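-- pv_equiv track=rewrite | github.com/jameslear314/AdventOfCode | 2020/10.py | prepare_combinatoric
-- ===== SOURCE A (Python) =====
-- def prepare_combinatoric(input):
--     diffs = set()
--     ranges = []
--     start = 0
--     for i in range(1, len(input)):
--         diff = input[i] - input[i - 1]
--         diffs.add(diff)
--         if diff >= 3:
--             # Segment the input into smaller chunks for combinatorics
--             ranges.append((start, i))
--             start = i
--     return diffs, ranges
-- ===== SOURCE B (Python) =====
-- def prepare_combinatoric(input):
--     n = len(input)
--     cuts = [i for i in range(1, n) if input[i] - input[i - 1] >= 3]
--     diffs = {input[i] - input[i - 1] for i in range(1, n)}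
--     ranges = list(zip([0] + cuts, cuts))
--     return diffs, ranges
-- ===== Notes on version B (the rewrite author's own statement) =====
-- stated objective: alternative
-- what changed: Replaces A's single stateful loop (running-start accumulator emitting ranges as it goes) by two declarative passes: a filter computing the cut indices and a zip of consecutive boundaries pairing them into ranges; diffs become a set comprehension.
import Mathlib
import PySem

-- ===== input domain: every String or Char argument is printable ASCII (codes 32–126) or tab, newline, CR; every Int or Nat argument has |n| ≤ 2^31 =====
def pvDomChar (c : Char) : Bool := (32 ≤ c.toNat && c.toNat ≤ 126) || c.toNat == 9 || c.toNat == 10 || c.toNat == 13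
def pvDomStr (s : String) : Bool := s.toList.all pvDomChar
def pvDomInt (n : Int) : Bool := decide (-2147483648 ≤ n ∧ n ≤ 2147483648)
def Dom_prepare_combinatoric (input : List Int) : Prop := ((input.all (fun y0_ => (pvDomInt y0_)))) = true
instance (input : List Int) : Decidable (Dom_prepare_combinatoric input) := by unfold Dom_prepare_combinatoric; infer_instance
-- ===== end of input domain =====

-- B replaces A's single stateful loop (running-start accumulator) by two declarative passes:
-- a filter computing cut indices and a zip of consecutive boundaries; same cost, different decomposition.


-- ===== PORT A =====
-- one loop over range(1, len(input)) carrying (diffs, ranges, start)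
def prepare_combinatoric (input : List Int) : List Int × (List (Int × Int)) :=
  let st := (PySem.List.pyRange 1 (input.length : Int) 1).foldl
    (fun (acc : PySem.Set Int × List (Int × Int) × Int) i =>
      let diff := PySem.List.pyGetD input i 0 - PySem.List.pyGetD input (i - 1) 0
      let diffs := PySem.Set.add acc.1 diff
      if diff ≥ 3 then (diffs, acc.2.1 ++ [(acc.2.2, i)], i)
      else (diffs, acc.2.1, acc.2.2))
    (PySem.Set.empty, [], 0)
  (st.1, st.2.1)

-- ===== PORT B =====
-- cut indices by a filter, ranges by zipping consecutive boundaries, diffs as a set comprehension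
def prepare_combinatoric_alt (input : List Int) : List Int × (List (Int × Int)) :=
  let idxs := PySem.List.pyRange 1 (input.length : Int) 1
  let d := fun i => PySem.List.pyGetD input i 0 - PySem.List.pyGetD input (i - 1) 0
  let cuts := idxs.filter (fun i => decide (d i ≥ 3))
  let diffs : PySem.Set Int := PySem.Set.ofList (idxs.map d)
  let ranges := List.zip (0 :: cuts) cuts
  (diffs, ranges)

-- ===== PRECONDITION & SPEC =====
def Spec_prepare_combinatoric (input : List Int) (out : List Int × (List (Int × Int))) : Prop := out = prepare_combinatoric_alt input
instance (input : List Int) (out : List Int × (List (Int × Int))) : Decidable (Spec_prepare_combinatoric input out) := by unfold Spec_prepare_combinatoric; infer_instance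

-- ===== CLAIM (what is proved, stated in full; the proofs are below) =====
def Claim_equal_prepare_combinatoric : Prop := ∀ (input : List Int), Dom_prepare_combinatoric input → Spec_prepare_combinatoric input (prepare_combinatoric input)

-- ===== LEMMAS AND PROOFS =====

-- A's loop, over an arbitrary index list, from an arbitrary state: the diffs accumulate by
-- Set.add, the ranges are the old ranges followed by the zip of consecutive boundaries
-- (seeded by the current start), and the final start is the last cut (or the old start).
theorem loopA_eq (d : Int → Int) (l : List Int) (s : PySem.Set Int)
    (r : List (Int × Int)) (st : Int) :
    l.foldl (fun (acc : PySem.Set Int × List (Int × Int) × Int) i =>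
        let diff := d i
        let diffs := PySem.Set.add acc.1 diff
        if diff ≥ 3 then (diffs, acc.2.1 ++ [(acc.2.2, i)], i)
        else (diffs, acc.2.1, acc.2.2)) (s, r, st)
      = (l.foldl (fun s i => PySem.Set.add s (d i)) s,
         r ++ List.zip (st :: l.filter (fun i => decide (d i ≥ 3)))
                       (l.filter (fun i => decide (d i ≥ 3))),
         (l.filter (fun i => decide (d i ≥ 3))).foldl (fun _ i => i) st) := by
  induction l generalizing s r st with
  | nil => simp
  | cons i l ih =>
    by_cases h : d i ≥ 3
    · have hf : List.filter (fun j => decide (d j ≥ 3)) (i :: l)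
          = i :: List.filter (fun j => decide (d j ≥ 3)) l := by
        simp [h]
      simp only [List.foldl_cons, if_pos h, hf, List.zip_cons_cons]
      rw [ih]
      simp
    · have hf : List.filter (fun j => decide (d j ≥ 3)) (i :: l)
          = List.filter (fun j => decide (d j ≥ 3)) l := by
        simp [h]
      simp only [List.foldl_cons, if_neg h, hf]
      rw [ih]

theorem prepare_combinatoric_eq (input : List Int) :
    prepare_combinatoric input = prepare_combinatoric_alt input := by
  unfold prepare_combinatoric prepare_combinatoric_alt
  rw [loopA_eq (fun i => PySem.List.pyGetD input i 0 - PySem.List.pyGetD input (i - 1) 0)]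
  simp [PySem.Set.ofList_eq_foldl, List.foldl_map]

-- ===== VERDICT (by name: the statement is the Claim_ definition above) =====
theorem prepare_combinatoric_spec : Claim_equal_prepare_combinatoric := by
  intro input _
  unfold Spec_prepare_combinatoric
  exact prepare_combinatoric_eq input
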